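-- pv_equiv track=rewrite | github.com/arnogeimer/flwr-contributions | shapley/kernel_samplers.py | n_con
-- ===== SOURCE A (Python) =====
-- Permutation = tuple[int, ...]
--
-- def n_con(x: Permutation, y: Permutation) -> int:
--     """Count concordant pairs between two permutations of the same elements.
--
--     A pair (i, j) with i < j is concordant if x and y agree on the relative
--     ordering: (x[i] - x[j]) and (y[i] - y[j]) have the same sign.
--     """
--     n = len(x)
--     count = 0
--     for i in range(n):
--         for j in range(i + 1, n):
--             if (x[i] - x[j]) * (y[i] - y[j]) > 0:
--                 count += 1
--     return count
-- ===== SOURCE B (Python) =====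
-- def n_con(x, y):
--     # Kendall-tau style counting: a pair is concordant iff, after sorting the
--     # points by (x, -y), its y-components are strictly ascending; count those
--     # ascending pairs with a merge-sort pass in O(n log n).
--     pts = sorted(((x[i], y[i]) for i in range(len(x))), key=lambda p: (p[0], -p[1]))
--     ys = [p[1] for p in pts]
--
--     def msort(a):
--         if len(a) <= 1:
--             return a, 0
--         m = len(a) // 2
--         left, cl = msort(a[:m])
--         right, cr = msort(a[m:])
--         merged = []
--         cm = 0
--         i = 0
--         j = 0
--         while i < len(left) and j < len(right):
--             if left[i] < right[j]:
--                 cm += len(right) - j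
--                 merged.append(left[i])
--                 i += 1
--             else:
--                 merged.append(right[j])
--                 j += 1
--         merged.extend(left[i:])
--         merged.extend(right[j:])
--         return merged, cl + cr + cm
--
--     return msort(ys)[1]
-- ===== Notes on version B (the rewrite author's own statement) =====
-- stated objective: faster
-- what changed: Replaces the O(n^2) double loop over index pairs by sorting the (x,y) points by (x,-y) and counting strictly ascending y-pairs with a merge-sort inversion-style pass in O(n log n).
-- outside the precondition, e.g. on n_con((1,), ()): A returns 0, B raises IndexError
import Mathlib
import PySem

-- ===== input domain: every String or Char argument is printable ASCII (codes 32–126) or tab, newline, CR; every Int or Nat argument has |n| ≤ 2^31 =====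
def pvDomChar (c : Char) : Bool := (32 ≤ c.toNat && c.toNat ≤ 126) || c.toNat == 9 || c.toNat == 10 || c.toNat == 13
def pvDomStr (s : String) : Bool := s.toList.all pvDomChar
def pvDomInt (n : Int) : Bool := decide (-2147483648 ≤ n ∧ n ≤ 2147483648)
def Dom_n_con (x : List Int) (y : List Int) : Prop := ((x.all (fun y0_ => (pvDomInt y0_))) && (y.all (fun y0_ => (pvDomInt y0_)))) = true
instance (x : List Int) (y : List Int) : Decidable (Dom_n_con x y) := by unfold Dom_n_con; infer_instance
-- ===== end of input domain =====

-- B sorts the points by (x, -y) and counts strictly ascending y-pairs with a merge-sort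
-- pass instead of A's scan over all index pairs (a timing run measured B faster).

-- ===== PORT A =====
def n_con (x : List Int) (y : List Int) : Int :=
  let n : Int := x.length
  (PySem.List.pyRange 0 n 1).foldl (fun count i =>
    (PySem.List.pyRange (i + 1) n 1).foldl (fun count j =>
      if (PySem.List.pyGetD x i 0 - PySem.List.pyGetD x j 0) *
         (PySem.List.pyGetD y i 0 - PySem.List.pyGetD y j 0) > 0
      then count + 1 else count) count) 0

-- ===== PORT B =====
-- the merge of B's while-loop: counts cross pairs (a from left, b from right, a < b);
-- the Nat argument is fuel making the recursion structural (unreachable default at 0: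
-- every call below passes at least the summed length)
def pvMerge : Nat → List Int → List Int → List Int × Int
  | _, [], r => (r, 0)
  | _, a :: l, [] => (a :: l, 0)
  | 0, _ :: _, _ :: _ => ([], 0)
  | fuel + 1, a :: l, b :: r =>
    if a < b then
      let m := pvMerge fuel l (b :: r)
      (a :: m.1, m.2 + ((r.length : Int) + 1))
    else
      let m := pvMerge fuel (a :: l) r
      (b :: m.1, m.2)

-- fuel likewise: a.length suffices (each half is strictly shorter)
def pvMsort : Nat → List Int → List Int × Int
  | 0, a => (a, 0)
  | fuel + 1, a =>
    if a.length ≤ 1 then (a, 0)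
    else
      let m := a.length / 2
      let L := pvMsort fuel (a.take m)
      let R := pvMsort fuel (a.drop m)
      let M := pvMerge (L.1.length + R.1.length) L.1 R.1
      (M.1, L.2 + R.2 + M.2)

def n_con_alt (x : List Int) (y : List Int) : Int :=
  -- pts = sorted(((x[i], y[i]) for i in range(len(x))), key=(x, -y))
  let pts := PySem.List.sorted2
    ((PySem.List.pyRange 0 (x.length : Int) 1).map
      (fun i => (PySem.List.pyGetD x i 0, PySem.List.pyGetD y i 0)))
    (fun p => p.1) (fun p => -p.2)
  let ys := pts.map (fun p => p.2)
  (pvMsort ys.length ys).2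

-- ===== PRECONDITION & SPEC =====
-- Pre_ excludes the inputs with len(y) < len(x): there A raises IndexError reading y[j]
-- whenever len(x) ≥ 2, and in the remaining corner len(x) = 1, len(y) = 0 (where A's
-- empty loops return 0) B's point construction y[i] itself raises IndexError.
def Pre_n_con (x : List Int) (y : List Int) : Prop := x.length ≤ y.length
instance (x : List Int) (y : List Int) : Decidable (Pre_n_con x y) := by unfold Pre_n_con; infer_instance

def pvWitness_n_con : List Int × List Int := ([1, 3, 2], [2, 1, 3])

def Spec_n_con (x : List Int) (y : List Int) (out : Int) : Prop := out = n_con_alt x y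
instance (x : List Int) (y : List Int) (out : Int) : Decidable (Spec_n_con x y out) := by unfold Spec_n_con; infer_instance

-- ===== CLAIM (what is proved, stated in full; the proofs are below) =====
def Claim_equal_n_con : Prop := ∀ (x : List Int) (y : List Int), Dom_n_con x y → Pre_n_con x y → Spec_n_con x y (n_con x y)

-- ===== LEMMAS AND PROOFS =====

-- number of position pairs i < j with S l[i] l[j] = true
def pairCount {α : Type} (S : α → α → Bool) : List α → Nat
  | [] => 0
  | a :: t => t.countP (S a) + pairCount S t

-- concordance test on zipped points: exactly A's product-sign test
def conc (p q : Int × Int) : Bool := decide (0 < (p.1 - q.1) * (p.2 - q.2))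

def ltb (a b : Int) : Bool := decide (a < b)

lemma conc_symm (p q : Int × Int) : conc p q = conc q p := by
  unfold conc
  rw [decide_eq_decide, mul_pos_iff, mul_pos_iff]
  omega

-- under the sort order of B (x ascending, ties with y descending) concordance of an
-- ordered pair is exactly strict ascent of the y components
lemma conc_of_lexle (p q : Int × Int) (h : p.1 < q.1 ∨ (p.1 = q.1 ∧ q.2 ≤ p.2)) :
    conc p q = ltb p.2 q.2 := by
  unfold conc ltb
  rw [decide_eq_decide, mul_pos_iff]
  omega

lemma pairCount_perm {α : Type} (S : α → α → Bool) (hs : ∀ a b, S a b = S b a)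
    {l l' : List α} (h : l.Perm l') : pairCount S l = pairCount S l' := by
  induction h with
  | nil => rfl
  | cons x h ih => simp [pairCount, ih, h.countP_eq]
  | swap x y l => simp [pairCount, List.countP_cons, hs x y]; omega
  | trans h1 h2 ih1 ih2 => exact ih1.trans ih2

lemma pairCount_congr_pairwise {α : Type} {R : α → α → Prop} {S T : α → α → Bool}
    {l : List α} (hl : l.Pairwise R) (h : ∀ a b, R a b → S a b = T a b) :
    pairCount S l = pairCount T l := by
  induction l with
  | nil => rfl
  | cons a t ih =>
    rcases List.pairwise_cons.mp hl with ⟨ha, ht⟩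
    have hc : t.countP (S a) = t.countP (T a) :=
      List.countP_congr (fun e he => by rw [h a e (ha e he)])
    simp only [pairCount, ih ht, hc]

lemma pairCount_snd (S : Int → Int → Bool) (l : List (Int × Int)) :
    pairCount (fun p q => S p.2 q.2) l = pairCount S (l.map (fun p => p.2)) := by
  induction l with
  | nil => rfl
  | cons a t ih => simp [pairCount, ih, List.countP_map, Function.comp_def]

lemma pairCount_append {α : Type} (S : α → α → Bool) (L R : List α) :
    pairCount S (L ++ R) = pairCount S L + pairCount S R + (L.map (fun a => R.countP (S a))).sum := by
  induction L with
  | nil => simp [pairCount]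
  | cons a t ih => simp [pairCount, ih, List.countP_append]; omega

-- ----- correctness of B's merge-sort counting pass -----

lemma merge_spec : ∀ (fuel : Nat) (L R : List Int), L.length + R.length ≤ fuel →
    L.Pairwise (· ≤ ·) → R.Pairwise (· ≤ ·) →
    (pvMerge fuel L R).1.Perm (L ++ R) ∧ (pvMerge fuel L R).1.Pairwise (· ≤ ·) ∧
    (pvMerge fuel L R).2 = ((L.map (fun a => R.countP (ltb a))).sum : Int) := by
  intro fuel
  induction fuel with
  | zero =>
    intro L R hf hL hR
    match L, R with
    | [], r => simpa [pvMerge] using hR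
    | a :: l, [] => simp [pvMerge, hL]
    | a :: l, b :: r => simp at hf
  | succ fuel ih =>
    intro L R hf hL hR
    match L, R with
    | [], r => simpa [pvMerge] using hR
    | a :: l, [] => simp [pvMerge, hL]
    | a :: l, b :: r =>
      rcases List.pairwise_cons.mp hL with ⟨haL, hl⟩
      rcases List.pairwise_cons.mp hR with ⟨hbR, hr⟩
      by_cases hab : a < b
      · obtain ⟨ihp, ihs, ihc⟩ := ih l (b :: r) (by simp at hf ⊢; omega) hl hR
        simp only [pvMerge, if_pos hab]
        refine ⟨ihp.cons a, ?_, ?_⟩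
        · refine List.pairwise_cons.mpr ⟨?_, ihs⟩
          intro e he
          have : e ∈ l ++ b :: r := ihp.mem_iff.mp he
          rcases List.mem_append.mp this with h | h
          · exact haL e h
          · rcases h with _ | h
            · omega
            · have := hbR e (by assumption); omega
        · have hall : (b :: r).countP (ltb a) = (b :: r).length := by
            apply List.countP_eq_length.mpr
            intro e he
            rcases he with _ | he
            · simpa [ltb] using hab
            · simp only [ltb, decide_eq_true_eq]
              have := hbR e (by assumption)
              omega
          rw [ihc]
          simp only [List.map_cons, List.sum_cons, hall]
          push_cast
          simp [List.length_cons]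
          ring
      · obtain ⟨ihp, ihs, ihc⟩ := ih (a :: l) r (by simp at hf ⊢; omega) hL hr
        simp only [pvMerge, if_neg hab]
        refine ⟨(ihp.cons b).trans (List.perm_middle).symm, ?_, ?_⟩
        · refine List.pairwise_cons.mpr ⟨?_, ihs⟩
          intro e he
          have : e ∈ (a :: l) ++ r := ihp.mem_iff.mp he
          rcases List.mem_append.mp this with h | h
          · rcases h with _ | h
            · omega
            · have := haL e (by assumption); omega
          · exact hbR e h
        · rw [ihc]
          congr 1
          apply congrArg
          apply List.map_congr_left
          intro e he
          have heb : ¬ e < b := by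
            rcases he with _ | h
            · omega
            · have := haL e (by assumption); omega
          simp [ltb, heb]

lemma msort_spec : ∀ (fuel : Nat) (a : List Int), a.length ≤ fuel →
    (pvMsort fuel a).1.Perm a ∧ (pvMsort fuel a).1.Pairwise (· ≤ ·) ∧
    (pvMsort fuel a).2 = ((pairCount ltb a : Nat) : Int) := by
  intro fuel
  induction fuel with
  | zero =>
    intro a ha
    have : a = [] := List.eq_nil_of_length_eq_zero (by omega)
    subst this
    exact ⟨List.Perm.refl _, List.Pairwise.nil, rfl⟩
  | succ fuel ih =>
    intro a ha
    by_cases h : a.length ≤ 1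
    · rw [pvMsort, if_pos h]
      refine ⟨List.Perm.refl a, ?_, ?_⟩
      · match a with
        | [] => simp
        | [x] => simp
        | x :: y :: t => simp at h
      · match a with
        | [] => rfl
        | [x] => simp [pairCount]
        | x :: y :: t => simp at h
    · rw [pvMsort, if_neg h]
      show (pvMerge ((pvMsort fuel (a.take (a.length / 2))).1.length + (pvMsort fuel (a.drop (a.length / 2))).1.length)
              (pvMsort fuel (a.take (a.length / 2))).1 (pvMsort fuel (a.drop (a.length / 2))).1).1.Perm a
        ∧ (pvMerge ((pvMsort fuel (a.take (a.length / 2))).1.length + (pvMsort fuel (a.drop (a.length / 2))).1.length)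
              (pvMsort fuel (a.take (a.length / 2))).1 (pvMsort fuel (a.drop (a.length / 2))).1).1.Pairwise (· ≤ ·)
        ∧ (pvMsort fuel (a.take (a.length / 2))).2 + (pvMsort fuel (a.drop (a.length / 2))).2
            + (pvMerge ((pvMsort fuel (a.take (a.length / 2))).1.length + (pvMsort fuel (a.drop (a.length / 2))).1.length)
                (pvMsort fuel (a.take (a.length / 2))).1 (pvMsort fuel (a.drop (a.length / 2))).1).2
          = ((pairCount ltb a : Nat) : Int)
      have ht : (a.take (a.length / 2)).length ≤ fuel := by
        simp only [List.length_take]; omega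
      have hd : (a.drop (a.length / 2)).length ≤ fuel := by
        simp only [List.length_drop]; omega
      obtain ⟨pL, sL, cL⟩ := ih _ ht
      obtain ⟨pR, sR, cR⟩ := ih _ hd
      obtain ⟨pM, sM, cM⟩ := merge_spec _ _ _ (le_refl _) sL sR
      have hsplit : a.take (a.length / 2) ++ a.drop (a.length / 2) = a :=
        List.take_append_drop _ a
      refine ⟨?_, sM, ?_⟩
      · have hpa : (a.take (a.length / 2) ++ a.drop (a.length / 2)).Perm a := by rw [hsplit]
        exact pM.trans ((pL.append pR).trans hpa)
      · have hcross : ((pvMsort fuel (a.take (a.length / 2))).1.map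
              (fun e => List.countP (ltb e) (pvMsort fuel (a.drop (a.length / 2))).1)).sum
            = ((a.take (a.length / 2)).map
              (fun e => List.countP (ltb e) (a.drop (a.length / 2)))).sum := by
          have h1 : ∀ e, List.countP (ltb e) (pvMsort fuel (a.drop (a.length / 2))).1
              = List.countP (ltb e) (a.drop (a.length / 2)) :=
            fun e => pR.countP_eq _
          calc _ = ((pvMsort fuel (a.take (a.length / 2))).1.map
                    (fun e => List.countP (ltb e) (a.drop (a.length / 2)))).sum := by
                simp only [h1]
            _ = _ := (pL.map _).sum_eq
        rw [cM, cL, cR, hcross]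
        have hpc : pairCount ltb a = pairCount ltb (a.take (a.length / 2))
            + pairCount ltb (a.drop (a.length / 2))
            + ((a.take (a.length / 2)).map
                (fun e => List.countP (ltb e) (a.drop (a.length / 2)))).sum := by
          conv_lhs => rw [← hsplit]
          exact pairCount_append ltb _ _
        rw [hpc]
        push_cast
        ring

-- ----- B's point comprehension equals x.zip y when len(x) ≤ len(y) -----

lemma pts_eq_zip (x y : List Int) (h : x.length ≤ y.length) :
    (PySem.List.pyRange 0 (x.length : Int) 1).map
      (fun i => (PySem.List.pyGetD x i 0, PySem.List.pyGetD y i 0)) = x.zip y := by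
  apply List.ext_getElem
  · rw [List.length_map, PySem.List.length_pyRange_one, List.length_zip]
    omega
  · intro k h1 h2
    rw [List.length_map, PySem.List.length_pyRange_one] at h1
    have hkx : k < x.length := by omega
    have hky : k < y.length := by omega
    rw [List.getElem_map, PySem.List.getElem_pyRange_one, zero_add, List.getElem_zip]
    have hgx : PySem.List.pyGetD x ((k : Nat) : Int) 0 = x[k] := by
      rw [PySem.List.pyGetD_natCast]; simp [hkx]
    have hgy : PySem.List.pyGetD y ((k : Nat) : Int) 0 = y[k] := by
      rw [PySem.List.pyGetD_natCast]; simp [hky]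
    rw [hgx, hgy]

-- ----- B's sorted2 with keys (x, -y) is sorted with the one lexicographic key -----

lemma sorted2_eq_sorted_lex (xs : List (Int × Int)) :
    PySem.List.sorted2 xs (fun p => p.1) (fun p => -p.2) false
      = PySem.List.sorted xs (fun p => toLex (p.1, -p.2)) false := by
  rw [PySem.List.sorted_eq_foldl_insertBy]
  unfold PySem.List.sorted2
  have hfun : (fun (a b : Int × Int) => decide (a.1 < b.1) || (!decide (b.1 < a.1) && decide (-a.2 < -b.2)))
      = (fun (a b : Int × Int) => decide (toLex (a.1, -a.2) < toLex (b.1, -b.2))) := by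
    funext a b
    rw [Bool.eq_iff_iff]
    simp only [Bool.or_eq_true, Bool.and_eq_true, Bool.not_eq_true', decide_eq_true_eq,
      decide_eq_false_iff_not, Prod.Lex.lt_iff, ofLex_toLex]
    omega
  simp only [Bool.false_eq_true, if_false, hfun]

lemma sorted_lex_pairwise (xs : List (Int × Int)) :
    (PySem.List.sorted xs (fun p => toLex (p.1, -p.2)) false).Pairwise
      (fun p q => p.1 < q.1 ∨ (p.1 = q.1 ∧ q.2 ≤ p.2)) := by
  have h := PySem.List.sorted_pairwise (xs := xs) (key := fun p => toLex (p.1, -p.2))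
  refine h.imp ?_
  intro p q hpq
  rw [Prod.Lex.le_iff] at hpq
  simp only [ofLex_toLex] at hpq
  omega

-- ----- A's double loop counts pairCount conc over the zipped list -----

lemma pyGetD_cons_succ {α : Type} (p : α) (t : List α) (i : Int) (d : α) (hi : 0 ≤ i) :
    PySem.List.pyGetD (p :: t) (i + 1) d = PySem.List.pyGetD t i d := by
  obtain ⟨k, rfl⟩ := Int.eq_ofNat_of_zero_le hi
  have h : (k : Int) + 1 = ((k + 1 : Nat) : Int) := by push_cast; ring
  rw [h, PySem.List.pyGetD_natCast, PySem.List.pyGetD_natCast]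
  simp

lemma map_pyRange_succ {β : Type} (f : Int → β) (n : Nat) :
    (PySem.List.pyRange 1 ((n : Int) + 1) 1).map f
      = (PySem.List.pyRange 0 (n : Int) 1).map (fun i => f (i + 1)) := by
  rw [PySem.List.pyRange_one, PySem.List.pyRange_one]
  simp only [List.map_map]
  have h1 : ((n : Int) + 1 - 1).toNat = n := by omega
  have h2 : ((n : Int) - 0).toNat = n := by omega
  rw [h1, h2]
  apply List.map_congr_left
  intro k _
  simp [Function.comp, add_comm]

lemma dbl_sum (S : (Int × Int) → (Int × Int) → Bool) (d : Int × Int) :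
    ∀ (l : List (Int × Int)),
    ((PySem.List.pyRange 0 (l.length : Int) 1).map
        (fun i => (((l.drop ((i + 1).toNat)).countP (S (PySem.List.pyGetD l i d)) : Nat) : Int))).sum
      = ((pairCount S l : Nat) : Int) := by
  intro l
  induction l with
  | nil => simp [PySem.List.pyRange_one_eq_nil, pairCount]
  | cons p t ih =>
    have hlen : ((p :: t).length : Int) = (t.length : Int) + 1 := by
      simp
    rw [hlen, PySem.List.pyRange_one_cons (by omega)]
    rw [List.map_cons, List.sum_cons, zero_add]
    rw [map_pyRange_succ]
    have hhead : ((p :: t).drop ((1 : Int).toNat)).countP (S (PySem.List.pyGetD (p :: t) 0 d))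
        = t.countP (S p) := by
      norm_num [PySem.List.pyGetD_zero_cons]
    have htail : (PySem.List.pyRange 0 (t.length : Int) 1).map
          (fun i => ((((p :: t).drop ((i + 1 + 1).toNat)).countP (S (PySem.List.pyGetD (p :: t) (i + 1) d)) : Nat) : Int))
        = (PySem.List.pyRange 0 (t.length : Int) 1).map
          (fun i => (((t.drop ((i + 1).toNat)).countP (S (PySem.List.pyGetD t i d)) : Nat) : Int)) := by
      apply List.map_congr_left
      intro i hi
      rw [PySem.List.mem_pyRange_one] at hi
      have h0 : 0 ≤ i := hi.1
      rw [pyGetD_cons_succ p t i d h0]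
      have hdrop : (i + 1 + 1).toNat = (i + 1).toNat + 1 := by omega
      rw [hdrop, List.drop_succ_cons]
    rw [htail, ih, hhead]
    simp [pairCount]

lemma A_repr (x y : List Int) (hxy : x.length ≤ y.length) :
    n_con x y = ((pairCount conc (x.zip y) : Nat) : Int) := by
  have hl : (x.zip y).length = x.length := by rw [List.length_zip]; omega
  have hget1 : ∀ (k : Int), 0 ≤ k → k < ((x.zip y).length : Int) →
      PySem.List.pyGetD x k 0 = (PySem.List.pyGetD (x.zip y) k ((0 : Int), (0 : Int))).1 := by
    intro k h0 h1
    have hkx : k < (x.length : Int) := by omega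
    rw [PySem.List.pyGetD_eq_getElem x 0 h0 hkx,
        PySem.List.pyGetD_eq_getElem (x.zip y) ((0 : Int), (0 : Int)) h0 h1]
    rw [List.getElem_zip]
  have hget2 : ∀ (k : Int), 0 ≤ k → k < ((x.zip y).length : Int) →
      PySem.List.pyGetD y k 0 = (PySem.List.pyGetD (x.zip y) k ((0 : Int), (0 : Int))).2 := by
    intro k h0 h1
    have hky : k < (y.length : Int) := by push_cast at h1 ⊢; omega
    rw [PySem.List.pyGetD_eq_getElem y 0 h0 hky,
        PySem.List.pyGetD_eq_getElem (x.zip y) ((0 : Int), (0 : Int)) h0 h1]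
    rw [List.getElem_zip]
  show (PySem.List.pyRange 0 (x.length : Int) 1).foldl (fun count i =>
    (PySem.List.pyRange (i + 1) (x.length : Int) 1).foldl (fun count j =>
      if (PySem.List.pyGetD x i 0 - PySem.List.pyGetD x j 0) *
         (PySem.List.pyGetD y i 0 - PySem.List.pyGetD y j 0) > 0
      then count + 1 else count) count) 0 = ((pairCount conc (x.zip y) : Nat) : Int)
  have hn : (x.length : Int) = ((x.zip y).length : Int) := by rw [hl]
  rw [hn]
  rw [PySem.List.foldl_congr_mem _ _
      (fun count i => count + ((((x.zip y).drop ((i + 1).toNat)).countP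
        (conc (PySem.List.pyGetD (x.zip y) i ((0 : Int), (0 : Int)))) : Nat) : Int)) 0 ?hout]
  case hout =>
    intro acc i hi
    rw [PySem.List.mem_pyRange_one] at hi
    obtain ⟨hi0, hilt⟩ := hi
    rw [PySem.List.foldl_congr_mem _ _
        (fun count j =>
          if 0 < ((PySem.List.pyGetD (x.zip y) i ((0 : Int), (0 : Int))).1
                    - (PySem.List.pyGetD (x.zip y) j ((0 : Int), (0 : Int))).1) *
                 ((PySem.List.pyGetD (x.zip y) i ((0 : Int), (0 : Int))).2
                    - (PySem.List.pyGetD (x.zip y) j ((0 : Int), (0 : Int))).2)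
          then count + 1 else count) acc ?hin]
    case hin =>
      intro c j hj
      rw [PySem.List.mem_pyRange_one] at hj
      have hj0 : 0 ≤ j := by omega
      rw [hget1 i hi0 hilt, hget1 j hj0 hj.2, hget2 i hi0 hilt, hget2 j hj0 hj.2]
    rw [PySem.List.foldl_pyRange_pyGetD' (x.zip y) ((0 : Int), (0 : Int))
        (fun c q => if 0 < ((PySem.List.pyGetD (x.zip y) i ((0 : Int), (0 : Int))).1 - q.1) *
                           ((PySem.List.pyGetD (x.zip y) i ((0 : Int), (0 : Int))).2 - q.2)
                    then c + 1 else c) acc (by omega : (0 : Int) ≤ i + 1)]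
    rw [PySem.List.foldl_ite_add_one]
    rfl
  rw [PySem.List.foldl_add]
  rw [zero_add]
  exact dbl_sum conc ((0 : Int), (0 : Int)) (x.zip y)

lemma B_repr (x y : List Int) (hxy : x.length ≤ y.length) :
    n_con_alt x y = ((pairCount conc (x.zip y) : Nat) : Int) := by
  show (pvMsort ((PySem.List.sorted2 ((PySem.List.pyRange 0 (x.length : Int) 1).map
          (fun i => (PySem.List.pyGetD x i 0, PySem.List.pyGetD y i 0)))
          (fun p => p.1) (fun p => -p.2)).map (fun p => p.2)).length
        ((PySem.List.sorted2 ((PySem.List.pyRange 0 (x.length : Int) 1).map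
          (fun i => (PySem.List.pyGetD x i 0, PySem.List.pyGetD y i 0)))
          (fun p => p.1) (fun p => -p.2)).map (fun p => p.2))).2
      = ((pairCount conc (x.zip y) : Nat) : Int)
  rw [pts_eq_zip x y hxy]
  rw [sorted2_eq_sorted_lex]
  rw [(msort_spec _ _ (le_refl _)).2.2]
  rw [← pairCount_snd]
  rw [pairCount_congr_pairwise (sorted_lex_pairwise (x.zip y))
      (fun p q h => (conc_of_lexle p q h).symm)]
  rw [pairCount_perm conc conc_symm (PySem.List.sorted_perm _ _ _)]

-- ===== VERDICT (by name: the statement is the Claim_ definition above) =====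
theorem n_con_spec : Claim_equal_n_con := by
  intro x y _ hpre
  unfold Spec_n_con
  rw [B_repr x y hpre, A_repr x y hpre]
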